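-- pv_equiv track=rewrite | github.com/AdL1398/PiCasso | source/modules/misc/portnumbers.py | get_free_port
-- ===== SOURCE A (Python) =====
-- def n_in_list(n, lst):
--     if (n in lst):
--        return True
--     else:
--        return False
--
-- def get_free_port(lst_assigned_ports, low_bound, upper_bound):
--     if (low_bound >= upper_bound):
--        return (-3)
--     elif (len(lst_assigned_ports) > (upper_bound - low_bound + 1)):
--        return (-2)
--     elif len(lst_assigned_ports) == 0:
--        return low_bound
--     else:
--        for portN in range(low_bound, upper_bound):
--            if (n_in_list(portN, lst_assigned_ports)):
--               pass
--            else: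
--               return (portN)
--        return(-1)
-- ===== SOURCE B (Python) =====
-- def get_free_port(lst_assigned_ports, low_bound, upper_bound):
--     if low_bound >= upper_bound:
--         return -3
--     if len(lst_assigned_ports) > upper_bound - low_bound + 1:
--         return -2
--     candidate = low_bound
--     for p in sorted(set(lst_assigned_ports)):
--         if p > candidate:
--             break
--         if p == candidate:
--             candidate += 1
--     return candidate if candidate < upper_bound else -1
-- ===== Notes on version B (the rewrite author's own statement) =====
-- stated objective: alternative
-- what changed: Instead of scanning every port of the range with a per-port membership test and early return (plus a special empty-list branch), B sorts the distinct assigned ports once and advances a candidate past consecutive assigned ports, so the loop runs over the assigned ports rather than over the range.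
import Mathlib
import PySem

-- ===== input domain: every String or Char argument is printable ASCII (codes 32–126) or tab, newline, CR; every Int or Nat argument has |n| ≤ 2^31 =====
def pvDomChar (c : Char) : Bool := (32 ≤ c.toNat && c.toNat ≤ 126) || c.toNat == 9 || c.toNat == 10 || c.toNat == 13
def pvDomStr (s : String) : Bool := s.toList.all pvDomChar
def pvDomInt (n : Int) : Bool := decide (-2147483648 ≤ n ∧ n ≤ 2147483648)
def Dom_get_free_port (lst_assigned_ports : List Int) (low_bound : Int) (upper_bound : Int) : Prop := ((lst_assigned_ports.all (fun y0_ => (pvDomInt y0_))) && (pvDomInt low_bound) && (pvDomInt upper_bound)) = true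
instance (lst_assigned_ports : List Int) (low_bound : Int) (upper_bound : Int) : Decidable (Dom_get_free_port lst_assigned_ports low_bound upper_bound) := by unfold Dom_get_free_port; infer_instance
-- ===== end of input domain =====

-- B replaces A's scan over the port range (membership test per port, early return)
-- by sorting the distinct assigned ports once and advancing a candidate past them:
-- a different traversal (over the assigned ports, not the range) with the same results.

-- ===== PORT A =====
def n_in_list (n : Int) (lst : List Int) : Bool :=
  if lst.contains n then true else false

-- the 'for portN in range(low_bound, upper_bound)' loop with its early return / final -1
-- (ported as recursion on the loop counter, faithful to Python's lazy range)
def gfpLoop (lst : List Int) (portN b : Int) : Int :=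
  if portN < b then
    (if n_in_list portN lst then gfpLoop lst (portN + 1) b else portN)
  else -1
termination_by (b - portN).toNat
decreasing_by simp_wf; omega

def get_free_port (lst_assigned_ports : List Int) (low_bound : Int) (upper_bound : Int) : Int :=
  if low_bound ≥ upper_bound then -3
  else if (lst_assigned_ports.length : Int) > upper_bound - low_bound + 1 then -2
  else if lst_assigned_ports.length = 0 then low_bound
  else gfpLoop lst_assigned_ports low_bound upper_bound

-- ===== PORT B =====
-- the 'for p in sorted(set(...))' loop: break on p > candidate, bump on p == candidate
def altLoop : Int → List Int → Int
  | candidate, [] => candidate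
  | candidate, p :: rest =>
      if p > candidate then candidate
      else if p = candidate then altLoop (candidate + 1) rest
      else altLoop candidate rest

def get_free_port_alt (lst_assigned_ports : List Int) (low_bound : Int) (upper_bound : Int) : Int :=
  if low_bound ≥ upper_bound then -3
  else if (lst_assigned_ports.length : Int) > upper_bound - low_bound + 1 then -2
  else
    let candidate :=
      altLoop low_bound (PySem.List.sorted (PySem.Set.ofList lst_assigned_ports) (fun x => x) false)
    if candidate < upper_bound then candidate else -1

-- ===== PRECONDITION & SPEC =====
def Spec_get_free_port (lst_assigned_ports : List Int) (low_bound : Int) (upper_bound : Int) (out : Int) : Prop := out = get_free_port_alt lst_assigned_ports low_bound upper_bound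
instance (lst_assigned_ports : List Int) (low_bound : Int) (upper_bound : Int) (out : Int) : Decidable (Spec_get_free_port lst_assigned_ports low_bound upper_bound out) := by unfold Spec_get_free_port; infer_instance

-- ===== CLAIM (what is proved, stated in full; the proofs are below) =====
def Claim_equal_get_free_port : Prop := ∀ (lst_assigned_ports : List Int) (low_bound : Int) (upper_bound : Int), Dom_get_free_port lst_assigned_ports low_bound upper_bound → Spec_get_free_port lst_assigned_ports low_bound upper_bound (get_free_port lst_assigned_ports low_bound upper_bound)

-- ===== LEMMAS AND PROOFS =====

theorem altLoop_ge (s : List Int) : ∀ c : Int, c ≤ altLoop c s := by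
  induction s with
  | nil => intro c; simp [altLoop]
  | cons p rest ih =>
      intro c
      simp only [altLoop]
      split_ifs with h1 h2
      · exact le_refl c
      · exact le_trans (by omega) (ih (c + 1))
      · exact ih c

theorem altLoop_not_mem (s : List Int) (hs : s.Pairwise (· < ·)) :
    ∀ c : Int, altLoop c s ∉ s := by
  induction s with
  | nil => intro c; simp
  | cons p rest ih =>
      intro c
      have hp : ∀ y ∈ rest, p < y := (List.pairwise_cons.mp hs).1
      have ht : rest.Pairwise (· < ·) := (List.pairwise_cons.mp hs).2
      simp only [altLoop]
      split_ifs with h1 h2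
      · intro hmem
        rcases List.mem_cons.mp hmem with h | h
        · omega
        · exact absurd (hp c h) (by omega)
      · intro hmem
        rcases List.mem_cons.mp hmem with h | h
        · have := altLoop_ge rest (c + 1); omega
        · exact ih ht (c + 1) h
      · intro hmem
        rcases List.mem_cons.mp hmem with h | h
        · have := altLoop_ge rest c; omega
        · exact ih ht c h

theorem altLoop_covers (s : List Int) : ∀ c m : Int, c ≤ m → m < altLoop c s → m ∈ s := by
  induction s with
  | nil => intro c m h1 h2; simp [altLoop] at h2; omega
  | cons p rest ih =>
      intro c m h1 h2
      simp only [altLoop] at h2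
      split_ifs at h2 with g1 g2
      · omega
      · by_cases hm : m = c
        · simp [hm, g2]
        · exact List.mem_cons_of_mem _ (ih (c + 1) m (by omega) h2)
      · exact List.mem_cons_of_mem _ (ih c m h1 h2)

-- membership in sorted(set(lst)) is membership in lst
theorem mem_sorted_set (lst : List Int) (x : Int) :
    x ∈ PySem.List.sorted (PySem.Set.ofList lst) (fun y => y) false ↔ x ∈ lst := by
  rw [PySem.List.mem_sorted, PySem.Set.mem_ofList]

-- A's scan returns x if x is the first element of [a, b) not in lst
theorem gfpLoop_finds (lst : List Int) (b x : Int) (hxb : x < b) (hx : x ∉ lst) :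
    ∀ k : Nat, ∀ a : Int, (x - a).toNat = k → a ≤ x →
      (∀ m : Int, a ≤ m → m < x → m ∈ lst) →
      gfpLoop lst a b = x := by
  intro k
  induction k with
  | zero =>
      intro a hk ha _
      have hax : a = x := by omega
      subst hax
      rw [gfpLoop]
      simp [n_in_list, hx, hxb]
  | succ k ih =>
      intro a hk ha hcov
      have hax : a < x := by omega
      have hamem : a ∈ lst := hcov a le_rfl hax
      rw [gfpLoop]
      simp only [if_pos (show a < b by omega), n_in_list,
        List.contains_iff_mem.mpr hamem, if_true]
      exact ih (a + 1) (by omega) (by omega) (fun m h1 h2 => hcov m (by omega) h2)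

-- A's scan returns -1 when every scanned port is assigned
theorem gfpLoop_all_assigned (lst : List Int) (b : Int) :
    ∀ k : Nat, ∀ a : Int, (b - a).toNat = k →
      (∀ m : Int, a ≤ m → m < b → m ∈ lst) → gfpLoop lst a b = -1 := by
  intro k
  induction k with
  | zero =>
      intro a hk _
      rw [gfpLoop, if_neg (by omega)]
  | succ k ih =>
      intro a hk h
      have ha : a < b := by omega
      have hmem : a ∈ lst := h a le_rfl ha
      rw [gfpLoop]
      simp only [if_pos ha, n_in_list, List.contains_iff_mem.mpr hmem, if_true]
      exact ih (a + 1) (by omega) (fun m h1 h2 => h m (by omega) h2)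

-- ===== VERDICT (by name: the statement is the Claim_ definition above) =====
theorem get_free_port_spec : Claim_equal_get_free_port := by
  intro lst low up _
  unfold Spec_get_free_port get_free_port get_free_port_alt
  by_cases h1 : low ≥ up
  · simp [h1]
  · simp only [h1, if_false]
    by_cases h2 : (lst.length : Int) > up - low + 1
    · simp [h2]
    · simp only [h2, if_false]
      set s := PySem.List.sorted (PySem.Set.ofList lst) (fun x => x) false with hs_def
      have hs : s.Pairwise (· < ·) := PySem.List.sorted_ofList_pairwise_lt lst
      set c := altLoop low s with hc_def
      have hcge : low ≤ c := altLoop_ge s low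
      have hcnot : c ∉ lst := fun h => altLoop_not_mem s hs low ((mem_sorted_set lst c).mpr h)
      have hcov : ∀ m : Int, low ≤ m → m < c → m ∈ lst :=
        fun m hm1 hm2 => (mem_sorted_set lst m).mp (altLoop_covers s low m hm1 hm2)
      by_cases h3 : lst.length = 0
      · have hlst : lst = [] := List.length_eq_zero_iff.mp h3
        have hc : c = low := by
          rcases lt_or_eq_of_le hcge with hlt | heq
          · exact absurd (hcov low le_rfl hlt) (by simp [hlst])
          · omega
        rw [if_pos h3, hc, if_pos (by omega)]
      · rw [if_neg h3]
        by_cases h4 : c < up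
        · rw [if_pos h4]
          exact gfpLoop_finds lst up c h4 hcnot (c - low).toNat low rfl hcge hcov
        · rw [if_neg h4]
          exact gfpLoop_all_assigned lst up (up - low).toNat low rfl
            (fun m h1 h2 => hcov m h1 (by omega))
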